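-- pv_equiv track=rewrite | github.com/SriVarshini15/LeetCode | 1741-sort-array-by-increasing-frequency/sort-array-by-increasing-frequency.py | frequencySort
-- ===== SOURCE A (Python) =====
-- def frequencySort(nums):
--     """
--     :type nums: List[int]
--     :rtype: List[int]
--     """
--     freq_map = {}
--     for i in range(len(nums)):
--         count = 0
--         for j in range(len(nums)):
--             if nums[i] == nums[j]:
--                 count += 1
--         freq_map[nums[i]] = count
--
--     # Sort by frequency ascending, value descending
--     sorted_items = sorted(freq_map.items(), key=lambda item: (item[1], -item[0]))
--
--     result = []
--     for key, freq in sorted_items: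
--         for _ in range(freq):
--             result.append(key)
--
--     return result
-- ===== SOURCE B (Python) =====
-- def frequencySort(nums):
--     count = {}
--     for x in nums:
--         count[x] = count.get(x, 0) + 1
--     return sorted(nums, key=lambda x: (count[x], -x))
-- ===== Notes on version B (the rewrite author's own statement) =====
-- stated objective: faster
-- what changed: B counts frequencies in one dict pass and stably sorts the whole list by (frequency, -value), replacing A's quadratic pairwise counting and its unique-key sort followed by expansion loops.
import Mathlib
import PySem

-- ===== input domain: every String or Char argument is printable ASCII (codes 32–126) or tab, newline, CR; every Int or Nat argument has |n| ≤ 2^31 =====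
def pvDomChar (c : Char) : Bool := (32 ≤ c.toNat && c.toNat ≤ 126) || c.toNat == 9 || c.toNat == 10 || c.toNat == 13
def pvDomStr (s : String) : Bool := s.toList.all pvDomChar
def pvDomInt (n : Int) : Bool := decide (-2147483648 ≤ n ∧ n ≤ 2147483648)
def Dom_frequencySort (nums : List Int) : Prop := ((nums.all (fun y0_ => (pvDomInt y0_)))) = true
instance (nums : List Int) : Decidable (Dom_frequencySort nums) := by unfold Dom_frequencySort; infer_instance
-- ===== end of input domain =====

-- B replaces A's quadratic pairwise frequency counting and its unique-key sort plus
-- expansion loops with one counting pass and a single stable sort of the whole list by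
-- (frequency, -value); a timing run measured B faster (A counts in O(n^2)).


-- ===== PORT A =====
def frequencySort (nums : List Int) : List Int :=
  let freq_map := (PySem.List.pyRange 0 (PySem.List.len nums) 1).foldl
    (fun d i =>
      let count := (PySem.List.pyRange 0 (PySem.List.len nums) 1).foldl
        (fun c j => if PySem.List.pyGetD nums i 0 == PySem.List.pyGetD nums j 0 then c + 1 else c)
        (0 : Int)
      d.insert (PySem.List.pyGetD nums i 0) count)
    (PySem.Dict.empty : PySem.Dict Int Int)
  let sorted_items := PySem.List.sorted2 freq_map.items (fun p => p.2) (fun p => -p.1)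
  sorted_items.foldl
    (fun result p => (PySem.List.pyRange 0 p.2 1).foldl (fun r _ => r ++ [p.1]) result) []

-- ===== PORT B =====
def frequencySort_alt (nums : List Int) : List Int :=
  let count := nums.foldl (fun d x => d.insert x (d.getD x 0 + 1))
    (PySem.Dict.empty : PySem.Dict Int Int)
  PySem.List.sorted2 nums (fun x => count.getD x 0) (fun x => -x)


-- ===== PRECONDITION & SPEC =====
def Spec_frequencySort (nums : List Int) (out : List Int) : Prop := out = frequencySort_alt nums
instance (nums : List Int) (out : List Int) : Decidable (Spec_frequencySort nums out) := by unfold Spec_frequencySort; infer_instance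

-- ===== CLAIM (what is proved, stated in full; the proofs are below) =====
def Claim_equal_frequencySort : Prop := ∀ (nums : List Int), Dom_frequencySort nums → Spec_frequencySort nums (frequencySort nums)

-- ===== LEMMAS AND PROOFS =====
theorem sorted2_eq_sorted_lex {α : Type} (xs : List α) (k1 k2 : α → Int) :
    PySem.List.sorted2 xs k1 k2 false
      = PySem.List.sorted xs (fun x => toLex (k1 x, k2 x)) false := by
  unfold PySem.List.sorted2 PySem.List.sorted
  simp only [Bool.false_eq_true, if_false]
  congr 1
  funext acc x
  congr 1
  funext a b
  simp only [Prod.Lex.toLex_lt_toLex]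
  by_cases h1 : k1 a < k1 b <;> by_cases h2 : k1 b < k1 a <;>
    by_cases h3 : k2 a < k2 b <;> simp_all <;>
    first | omega | (have : k1 a = k1 b := le_antisymm h2 h1; simp [this])

theorem getD_foldl_insert_fun (l : List Int) (g : Int → Int) (d : PySem.Dict Int Int) (k : Int) :
    (l.foldl (fun d x => d.insert x (g x)) d).getD k 0
      = if k ∈ l then g k else d.getD k 0 := by
  induction l generalizing d with
  | nil => simp
  | cons y t ih =>
    simp only [List.foldl_cons, ih, List.mem_cons, PySem.Dict.getD_insert]
    by_cases hk : k ∈ t <;> by_cases hy : k = y <;> simp_all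

theorem count_flatMap_replicate (cnt : Int → Nat) (L : List Int) (hnd : L.Nodup) (a : Int) :
    (L.flatMap (fun k => List.replicate (cnt k) k)).count a
      = if a ∈ L then cnt a else 0 := by
  induction L with
  | nil => simp
  | cons y t ih =>
    simp only [List.nodup_cons] at hnd
    simp only [List.flatMap_cons, List.count_append, List.count_replicate, ih hnd.2,
      List.mem_cons]
    by_cases hy : a = y <;> by_cases ht : a ∈ t <;> simp_all <;>
      (intro h; exact absurd h.symm hy)

theorem pairwise_flatMap_of_const {α : Type} (S : List α) (f : α → List Int)
    (kk : α → Lex (Int × Int)) (K : Int → Lex (Int × Int))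
    (hS : S.Pairwise (fun p q => kk p ≤ kk q))
    (hf : ∀ p ∈ S, ∀ x ∈ f p, K x = kk p) :
    (S.flatMap f).Pairwise (fun a b => K a ≤ K b) := by
  induction S with
  | nil => simp
  | cons p t ih =>
    simp only [List.pairwise_cons] at hS
    simp only [List.flatMap_cons]
    rw [List.pairwise_append]
    refine ⟨?_, ih hS.2 (fun q hq => hf q (List.mem_cons_of_mem _ hq)), ?_⟩
    · apply List.Pairwise.imp_of_mem (l := f p) (R := fun a b => True) ?_ ?_
      · intro a b ha hb _
        rw [hf p (List.mem_cons_self ..) a ha, hf p (List.mem_cons_self ..) b hb]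
      · exact List.pairwise_of_forall (by intro _ _; trivial)
    · intro a ha b hb
      rcases List.mem_flatMap.mp hb with ⟨q, hq, hbq⟩
      rw [hf p (List.mem_cons_self ..) a ha, hf q (List.mem_cons_of_mem _ hq) b hbq]
      exact hS.1 q hq

theorem main_eq (nums : List Int) : frequencySort nums = frequencySort_alt nums := by
  -- notation
  set K : Int → Lex (Int × Int) := fun x => toLex ((nums.count x : Int), -x) with hK
  -- B side
  have hB : frequencySort_alt nums = PySem.List.sorted nums K false := by
    unfold frequencySort_alt
    have hkey : (fun x => (nums.foldl (fun d x => d.insert x (d.getD x 0 + 1))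
        (PySem.Dict.empty : PySem.Dict Int Int)).getD x 0) = fun x => (nums.count x : Int) := by
      funext x
      rw [PySem.Dict.getD_foldl_insert_add_one]
      simp
    simp only [hkey]
    rw [sorted2_eq_sorted_lex]
  -- A side
  have hinner : ∀ x : Int, (PySem.List.pyRange 0 (PySem.List.len nums) 1).foldl
      (fun c j => if x == PySem.List.pyGetD nums j 0 then c + 1 else c) (0 : Int)
        = (nums.count x : Int) := by
    intro x
    rw [PySem.List.foldl_pyRange_zero_pyGetD nums 0 (fun c y => if x == y then c + 1 else c) 0]
    rw [PySem.List.foldl_congr_mem nums _ (fun c y => if y == x then c + 1 else c) 0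
      (by intro acc y _
          by_cases h : x = y
          · simp [h]
          · simp [h, Ne.symm h])]
    rw [PySem.List.foldl_beq_add_one]
    simp
  have hmap : (PySem.List.pyRange 0 (PySem.List.len nums) 1).foldl
      (fun d i =>
        d.insert (PySem.List.pyGetD nums i 0)
          ((PySem.List.pyRange 0 (PySem.List.len nums) 1).foldl
            (fun c j => if PySem.List.pyGetD nums i 0 == PySem.List.pyGetD nums j 0 then c + 1 else c)
            (0 : Int)))
      (PySem.Dict.empty : PySem.Dict Int Int)
      = nums.foldl (fun d x => d.insert x (nums.count x : Int)) PySem.Dict.empty := by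
    rw [PySem.List.foldl_pyRange_zero_pyGetD nums 0
      (fun (d : PySem.Dict Int Int) (x : Int) => d.insert x ((PySem.List.pyRange 0 (PySem.List.len nums) 1).foldl
        (fun c j => if x == PySem.List.pyGetD nums j 0 then c + 1 else c) (0 : Int)))]
    exact PySem.List.foldl_congr_mem nums _ _ _ (by intro acc x _; rw [hinner])
  have hitems : (nums.foldl (fun d x => d.insert x (nums.count x : Int))
      (PySem.Dict.empty : PySem.Dict Int Int)).items
      = (PySem.Set.ofList nums).map (fun k => (k, (nums.count k : Int))) := by
    have hnd : (nums.foldl (fun d x => d.insert x (nums.count x : Int))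
        (PySem.Dict.empty : PySem.Dict Int Int)).keys.Nodup :=
      PySem.Dict.nodup_keys_foldl_insert nums (fun _ x => (nums.count x : Int)) _ (by simp)
    have hkeys : (nums.foldl (fun d x => d.insert x (nums.count x : Int))
        (PySem.Dict.empty : PySem.Dict Int Int)).keys = PySem.Set.ofList nums := by
      rw [PySem.Dict.keys_foldl_insert nums (fun _ x => (nums.count x : Int))]
      simp [PySem.Set.update, PySem.Set.ofList_eq_foldl, PySem.Dict.keys, PySem.Dict.empty]
    rw [PySem.Dict.items_eq_map_keys _ hnd 0, hkeys]
    apply List.map_congr_left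
    intro k hk
    rw [getD_foldl_insert_fun]
    simp [(PySem.Set.mem_ofList nums k).mp hk]
  -- the expansion loop
  have hexp : ∀ (S : List (Int × Int)),
      S.foldl (fun result p => (PySem.List.pyRange 0 p.2 1).foldl (fun r _ => r ++ [p.1]) result) []
        = S.flatMap (fun p => List.replicate p.2.toNat p.1) := by
    intro S
    rw [PySem.List.foldl_congr_mem S _
      (fun result p => result ++ List.replicate p.2.toNat p.1) []
      (by
        intro acc p _
        rw [PySem.List.foldl_append_singleton_eq_map (fun _ => p.1)]
        simp [List.map_const', PySem.List.length_pyRange_one])]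
    rw [PySem.List.foldl_append_eq_flatMap]
    simp
  -- put A together
  simp only [frequencySort]
  rw [hmap, hitems, hexp, sorted2_eq_sorted_lex]
  set S := PySem.List.sorted ((PySem.Set.ofList nums).map (fun k => (k, (nums.count k : Int))))
    (fun p => toLex (p.2, -p.1)) false with hS
  -- final comparison
  rw [hB]
  apply PySem.List.eq_of_perm_of_pairwise_le_of_injective K
  · intro x y hxy
    have h2 := congrArg (fun p => (ofLex p).2) hxy
    simp [hK] at h2
    omega
  · -- perm: flatMap ~ nums ~ sorted nums K
    have h1 : S.Perm ((PySem.Set.ofList nums).map (fun k => (k, (nums.count k : Int)))) :=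
      PySem.List.sorted_perm _ _ _
    have h2 : (S.flatMap (fun p => List.replicate p.2.toNat p.1)).Perm
        (((PySem.Set.ofList nums).map (fun k => (k, (nums.count k : Int)))).flatMap
          (fun p => List.replicate p.2.toNat p.1)) :=
      h1.flatMap (by intro a _; exact List.Perm.refl _)
    have h3 : (((PySem.Set.ofList nums).map (fun k => (k, (nums.count k : Int)))).flatMap
        (fun p => List.replicate p.2.toNat p.1)).Perm nums := by
      rw [List.flatMap_map]
      rw [List.perm_iff_count]
      intro a
      rw [count_flatMap_replicate (fun k => ((nums.count k : Int)).toNat) _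
        (PySem.Set.nodup_ofList nums) a]
      by_cases ha : a ∈ nums
      · simp [(PySem.Set.mem_ofList nums a).mpr ha]
      · simp [ha, List.count_eq_zero_of_not_mem ha]
    exact (h2.trans h3).trans (PySem.List.sorted_perm nums K false).symm
  · -- pairwise on flatMap
    apply pairwise_flatMap_of_const S _ (fun p => toLex (p.2, -p.1)) K
    · exact PySem.List.sorted_pairwise _ _
    · intro p hp x hx
      have hpmem : p ∈ (PySem.Set.ofList nums).map (fun k => (k, (nums.count k : Int))) := by
        have := (PySem.List.mem_sorted (xs := (PySem.Set.ofList nums).map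
          (fun k => (k, (nums.count k : Int)))) (key := fun p => toLex (p.2, -p.1))
          (rev := false) (x := p)).mp (hS ▸ hp)
        exact this
      rcases List.mem_map.mp hpmem with ⟨k, _, hkp⟩
      have hxk : x = p.1 := by
        rcases List.eq_of_mem_replicate hx with h; exact h
      subst hxk
      rw [hK]
      cases hkp
      simp
  · exact PySem.List.sorted_pairwise nums K

-- ===== VERDICT (by name: the statement is the Claim_ definition above) =====
theorem frequencySort_spec : Claim_equal_frequencySort := by
  intro nums _
  unfold Spec_frequencySort
  exact main_eq nums
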